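-- pv_equiv track=rewrite | github.com/Ephrem-shimels21/Competitive-Programming | A2SV G5 - Contest #15 07-May-2024/C - ANDy Session 142623.py | find_max_result
-- ===== SOURCE A (Python) =====
-- def find_max_result(arr, k):
--     length = len(arr)
--     result = 0
--
--     for pos in range(30, -1, -1):
--         count = sum(1 for num in arr if num & (1 << pos))
--         operations_needed = length - count
--
--         if k >= operations_needed:
--             result |= 1 << pos
--             k -= operations_needed
--
--     return result
-- ===== SOURCE B (Python) =====
-- def find_max_result(arr, k):
--     def go(pos, budget):
--         if pos < 0:
--             return 0
--         missing = len([num for num in arr if not num & (1 << pos)])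
--         if budget >= missing:
--             return (1 << pos) | go(pos - 1, budget - missing)
--         return go(pos - 1, budget)
--     return go(30, k)
-- ===== Notes on version B (the rewrite author's own statement) =====
-- stated objective: alternative
-- what changed: B is a top-down recursion on the bit position with the remaining budget as a parameter: it counts the elements MISSING each bit directly (no length-minus-count), and builds the answer by OR-ing the current bit onto the recursive result for the lower bits, instead of A's iterative range(30,-1,-1) loop mutating a (result,k) accumulator with per-bit set-counts.
import Mathlib
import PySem

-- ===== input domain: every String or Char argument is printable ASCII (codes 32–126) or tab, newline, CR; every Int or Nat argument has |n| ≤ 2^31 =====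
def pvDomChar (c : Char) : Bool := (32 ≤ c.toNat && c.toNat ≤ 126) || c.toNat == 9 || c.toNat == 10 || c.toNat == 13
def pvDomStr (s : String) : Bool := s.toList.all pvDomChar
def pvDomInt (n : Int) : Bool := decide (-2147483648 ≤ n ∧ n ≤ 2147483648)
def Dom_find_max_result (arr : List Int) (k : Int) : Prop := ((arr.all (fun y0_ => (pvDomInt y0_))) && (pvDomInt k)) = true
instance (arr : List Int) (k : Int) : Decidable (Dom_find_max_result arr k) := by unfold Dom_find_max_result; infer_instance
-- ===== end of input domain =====

-- B replaces A's iterative loop over range(30,-1,-1) with (result,k) accumulators by a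
-- top-down recursion on the bit position that counts missing elements directly and ORs
-- the bit onto the recursive answer; return values proved equal on all inputs.

-- ===== PORT A =====
-- 'sum(1 for num in arr if num & (1 << pos))' is a 0/1-sum, ported as countP (truthiness: ≠ 0);
-- pos ranges over 30..0 so 'pos.toNat' in the shift is exact.
def find_max_result (arr : List Int) (k : Int) : Int :=
  let length : Int := arr.length
  (((PySem.List.pyRange 30 (-1) (-1)).foldl
      (fun (st : Int × Int) (pos : Int) =>
        let count : Int := arr.countP (fun num => PySem.Int.band num ((1 : Int) <<< pos.toNat) != 0)
        let operations_needed := length - count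
        if st.2 ≥ operations_needed then
          (PySem.Int.bor st.1 ((1 : Int) <<< pos.toNat), st.2 - operations_needed)
        else st)
      (0, k)).1)

-- ===== PORT B =====
-- 'go(pos, budget)': fuel n+1 stands for pos = n, fuel 0 for pos < 0 (the base case).
-- 'not num & (1 << pos)' is Python truthiness: true iff the AND is 0.
def pvGo (arr : List Int) : Nat → Int → Int
  | 0, _ => 0
  | n + 1, budget =>
    let missing : Int := (arr.filter (fun num => PySem.Int.band num ((1 : Int) <<< n) == 0)).length
    if budget ≥ missing then PySem.Int.bor ((1 : Int) <<< n) (pvGo arr n (budget - missing))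
    else pvGo arr n budget

def find_max_result_alt (arr : List Int) (k : Int) : Int := pvGo arr 31 k

-- ===== PRECONDITION & SPEC =====
def Spec_find_max_result (arr : List Int) (k : Int) (out : Int) : Prop := out = find_max_result_alt arr k
instance (arr : List Int) (k : Int) (out : Int) : Decidable (Spec_find_max_result arr k out) := by unfold Spec_find_max_result; infer_instance

-- ===== CLAIM (what is proved, stated in full; the proofs are below) =====
def Claim_equal_find_max_result : Prop := ∀ (arr : List Int) (k : Int), Dom_find_max_result arr k → Spec_find_max_result arr k (find_max_result arr k)

-- ===== LEMMAS AND PROOFS =====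

theorem pvBorNonneg (a b : Int) (ha : 0 ≤ a) (hb : 0 ≤ b) : 0 ≤ PySem.Int.bor a b := by
  rw [PySem.Int.bor_of_nonneg ha hb]; exact Int.natCast_nonneg _

theorem pvBorAssoc (a b c : Int) (ha : 0 ≤ a) (hb : 0 ≤ b) (hc : 0 ≤ c) :
    PySem.Int.bor a (PySem.Int.bor b c) = PySem.Int.bor (PySem.Int.bor a b) c := by
  rw [PySem.Int.bor_of_nonneg hb hc, PySem.Int.bor_of_nonneg ha hb,
      PySem.Int.bor_of_nonneg ha (Int.natCast_nonneg _),
      PySem.Int.bor_of_nonneg (Int.natCast_nonneg _) hc]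
  simp [Nat.lor_assoc]

theorem pvGo_nonneg (arr : List Int) (n : Nat) (k : Int) : 0 ≤ pvGo arr n k := by
  induction n generalizing k with
  | zero => simp [pvGo]
  | succ m ih =>
    rw [pvGo]
    split
    · exact pvBorNonneg _ _ (by rw [Int.shiftLeft_eq]; positivity) (ih _)
    · exact ih _

-- elements missing bit n = length - elements having bit n
theorem pvMissingEq (arr : List Int) (b : Int) :
    ((arr.filter (fun num => PySem.Int.band num b == 0)).length : Int) =
      (arr.length : Int) - arr.countP (fun num => PySem.Int.band num b != 0) := by
  induction arr with
  | nil => simp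
  | cons a t ih =>
    by_cases h : PySem.Int.band a b = 0 <;>
      simp [h, ih]; ring

-- A's loop over [n-1, …, 0] from state (r, k) computes r OR pvGo arr n k
theorem pvLoopEq (arr : List Int) (n : Nat) :
    ∀ (r k : Int), 0 ≤ r →
      ((((List.range n).reverse.map (Int.ofNat)).foldl
          (fun (st : Int × Int) (pos : Int) =>
            let count : Int := arr.countP (fun num => PySem.Int.band num ((1 : Int) <<< pos.toNat) != 0)
            let operations_needed := (arr.length : Int) - count
            if st.2 ≥ operations_needed then
              (PySem.Int.bor st.1 ((1 : Int) <<< pos.toNat), st.2 - operations_needed)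
            else st)
          (r, k)).1) = PySem.Int.bor r (pvGo arr n k) := by
  induction n with
  | zero =>
    intro r k hr
    simp [pvGo]
  | succ m ih =>
    intro r k hr
    rw [List.range_succ]
    simp only [List.reverse_append, List.reverse_cons, List.reverse_nil, List.nil_append,
      List.singleton_append, List.map_cons, List.foldl_cons]
    have htn : (Int.ofNat m).toNat = m := rfl
    rw [htn, pvGo]
    simp only [pvMissingEq arr ((1 : Int) <<< m)]
    split_ifs with hc
    · rw [ih _ _ (pvBorNonneg _ _ hr (by rw [Int.shiftLeft_eq]; positivity))]
      exact (pvBorAssoc r _ _ hr (by rw [Int.shiftLeft_eq]; positivity) (pvGo_nonneg arr m _)).symm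
    · exact ih _ _ hr

theorem pvRangeEq : PySem.List.pyRange 30 (-1) (-1) = (List.range 31).reverse.map (Int.ofNat) := by
  decide

-- ===== VERDICT (by name: the statement is the Claim_ definition above) =====
theorem find_max_result_spec : Claim_equal_find_max_result := by
  intro arr k _
  unfold Spec_find_max_result find_max_result find_max_result_alt
  rw [pvRangeEq, pvLoopEq arr 31 0 k (le_refl 0),
      PySem.Int.bor_comm, PySem.Int.bor_zero]
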